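-- pv_equiv track=rewrite | github.com/NhatNguyen5/bookbot | stats.py | count_alpbt
-- ===== SOURCE A (Python) =====
-- def count_alpbt(str):
--     ret_counts = {}
--     for c in str:
--         c_lower = c.lower()
--         if c == "\n": c_lower = "\\n" #display end line as '\n'
--         if c == " ": c_lower = "\' \'" #display space as ' '
--         if c_lower not in ret_counts:
--             ret_counts[c_lower] = 1 #if a character not in the dictionary, initialize
--         else:
--             ret_counts[c_lower] += 1 #if a character is in the dictionary, increment by 1
--     return ret_counts
-- ===== SOURCE B (Python) =====
-- def count_alpbt(str):
--     t = ["\\n" if c == "\n" else "' '" if c == " " else c.lower() for c in str]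
--
--     def go(t):
--         # partition recursion: first key, count = how many elements vanish
--         # when all its occurrences are removed; recurse on the remainder
--         if not t:
--             return {}
--         k = t[0]
--         rest = [x for x in t if x != k]
--         out = {k: len(t) - len(rest)}
--         out.update(go(rest))
--         return out
--
--     return go(t)
-- ===== Notes on version B (the rewrite author's own statement) =====
-- stated objective: alternative
-- what changed: Replaces the single-pass dict accumulation (membership test + init/increment per character) with a partition recursion that uses no counting container at all: map characters to display keys, then repeatedly take the first key, obtain its count as the length drop after filtering out all its occurrences, and recurse on the remainder.
import Mathlib
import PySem

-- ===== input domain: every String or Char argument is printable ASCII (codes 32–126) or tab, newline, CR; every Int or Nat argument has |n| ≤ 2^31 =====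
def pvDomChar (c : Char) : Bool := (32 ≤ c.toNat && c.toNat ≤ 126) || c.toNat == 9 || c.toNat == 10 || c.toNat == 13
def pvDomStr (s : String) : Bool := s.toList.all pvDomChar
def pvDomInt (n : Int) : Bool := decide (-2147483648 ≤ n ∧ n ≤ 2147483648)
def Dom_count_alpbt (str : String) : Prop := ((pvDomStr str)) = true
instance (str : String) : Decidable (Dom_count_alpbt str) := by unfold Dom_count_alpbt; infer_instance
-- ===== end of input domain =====

-- B replaces A's single-pass dict accumulation by a partition recursion with no counting
-- container: take the first display key, count it as the length drop after filtering out
-- all its occurrences, recurse on the remainder (alternative decomposition, same values).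


-- ===== PORT A =====
def count_alpbt (str : String) : List (String × Int) :=
  (str.toList.foldl (fun (d : PySem.Dict String Int) c =>
      let cl0 := PySem.Str.lower (String.mk [c])
      let cl1 := if c == '\n' then "\\n" else cl0
      let cl := if c == ' ' then "' '" else cl1
      if d.contains cl = false then d.insert cl 1 else d.modify cl 0 (· + 1))
    PySem.Dict.empty).items

-- ===== PORT B =====
def pvDisplayKey (c : Char) : String :=
  if c == '\n' then "\\n" else if c == ' ' then "' '" else PySem.Str.lower (String.mk [c])

-- Source B's `go`: first key, count = length drop after removing all its occurrences, recurse
def pvGo : List String → List (String × Int)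
  | [] => []
  | k :: ts =>
      let rest := (k :: ts).filter (fun x => x ≠ k)
      (k, ((ts.length + 1 : Int) - rest.length)) :: pvGo rest
termination_by t => t.length
decreasing_by
  have h := List.length_filter_le (fun x => !(x == k)) ts
  simp_all
  omega

def count_alpbt_alt (str : String) : List (String × Int) :=
  pvGo (str.toList.map pvDisplayKey)

-- ===== PRECONDITION & SPEC =====
def Spec_count_alpbt (str : String) (out : List (String × Int)) : Prop := out = count_alpbt_alt str
instance (str : String) (out : List (String × Int)) : Decidable (Spec_count_alpbt str out) := by unfold Spec_count_alpbt; infer_instance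

-- ===== CLAIM (what is proved, stated in full; the proofs are below) =====
def Claim_equal_count_alpbt : Prop := ∀ (str : String), Dom_count_alpbt str → Spec_count_alpbt str (count_alpbt str)

-- ===== LEMMAS AND PROOFS =====

-- A's conditional update equals an unconditional `modify`
theorem pv_step_eq (d : PySem.Dict String Int) (k : String) :
    (if d.contains k = false then d.insert k 1 else d.modify k 0 (· + 1))
      = d.modify k 0 (· + 1) := by
  by_cases h : d.contains k = false
  · simp [PySem.Dict.modify, PySem.Dict.getD_of_not_contains, h]
  · simp [h]

-- A's three-step key computation equals B's if-chain
theorem pv_key_eq (c : Char) :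
    (if c == ' ' then "' '"
     else if c == '\n' then "\\n" else PySem.Str.lower (String.mk [c])) = pvDisplayKey c := by
  unfold pvDisplayKey
  by_cases h1 : c = '\n' <;> by_cases h2 : c = ' ' <;> simp_all

-- a filter partitions the length of a list
theorem pv_filter_split (p : String → Bool) (l : List String) :
    (l.filter p).length + (l.filter (fun x => !p x)).length = l.length := by
  induction l with
  | nil => rfl
  | cons x l ih => by_cases h : p x <;> simp_all <;> omega

-- filtering commutes with ordered dedup
theorem pv_ofList_filter (p : String → Bool) (ts : List String) :
    (PySem.Set.ofList ts).filter p = PySem.Set.ofList (ts.filter p) := by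
  induction ts with
  | nil => rfl
  | cons x ts ih =>
    rw [PySem.Set.ofList_cons, List.filter_cons]
    by_cases hp : p x = true
    · rw [if_pos hp, List.filter_cons_of_pos hp, PySem.Set.ofList_cons]
      simp only [PySem.Set.discard, List.filter_filter, ← ih]
      congr 1
      apply List.filter_congr
      intro y _
      exact Bool.and_comm _ _
    · have hp' : p x = false := by simpa using hp
      rw [if_neg hp, List.filter_cons_of_neg hp]
      simp only [PySem.Set.discard, List.filter_filter, ← ih, List.filter_filter]
      apply List.filter_congr
      intro y _
      by_cases hyx : y = x
      · subst hyx; simp [hp']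
      · simp [hyx]

-- the partition recursion computes exactly (ordered distinct keys, their counts)
theorem pvGo_eq : ∀ (l : List String),
    pvGo l = (PySem.Set.ofList l).map (fun k => (k, (l.count k : Int)))
  | [] => by rw [pvGo]; rfl
  | k :: ts => by
    rw [pvGo]
    have hrest : (k :: ts).filter (fun x => x ≠ k) = ts.filter (fun x => !decide (x = k)) := by
      simp
    rw [PySem.Set.ofList_cons, List.map_cons]
    rw [hrest, pvGo_eq (ts.filter (fun x => !decide (x = k)))]
    congr 1
    · have hsplit := pv_filter_split (fun x => decide (x = k)) ts
      have hbeq : ts.filter (fun x => x == k) = ts.filter (fun x => decide (x = k)) :=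
        List.filter_congr (fun y _ => by by_cases h : y = k <;> simp [h])
      have hcount : (k :: ts).count k = (ts.filter (fun x => x == k)).length + 1 := by
        simp [List.count_eq_length_filter]
      rw [hcount, hbeq]
      simp only [Prod.mk.injEq, true_and]
      push_cast
      omega
    · have hdis : PySem.Set.discard (PySem.Set.ofList ts) k
          = PySem.Set.ofList (ts.filter (fun x => !decide (x = k))) := by
        rw [← pv_ofList_filter]
        simp only [PySem.Set.discard]
        apply List.filter_congr
        intro y _
        by_cases h : y = k <;> simp [h]
      rw [hdis]
      apply List.map_congr_left
      intro y hy
      have hyk : y ≠ k := by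
        have h2 := (PySem.Set.mem_ofList _ _).mp hy
        simp only [List.mem_filter, Bool.not_eq_true', decide_eq_false_iff_not] at h2
        exact h2.2
      simp only [Prod.mk.injEq, true_and]
      congr 1
      rw [List.count_cons_of_ne (Ne.symm hyk), List.count_filter (by simp [hyk])]
termination_by l => l.length
decreasing_by
  have h := List.length_filter_le (fun x => !decide (x = k)) ts
  simp_all

-- ===== VERDICT (by name: the statement is the Claim_ definition above) =====
theorem count_alpbt_spec : Claim_equal_count_alpbt := by
  intro str _
  unfold Spec_count_alpbt count_alpbt count_alpbt_alt
  have hfold :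
      str.toList.foldl (fun (d : PySem.Dict String Int) c =>
        let cl0 := PySem.Str.lower (String.mk [c])
        let cl1 := if c == '\n' then "\\n" else cl0
        let cl := if c == ' ' then "' '" else cl1
        if d.contains cl = false then d.insert cl 1 else d.modify cl 0 (· + 1))
        PySem.Dict.empty
      = PySem.Dict.counter (str.toList.map pvDisplayKey) := by
    rw [PySem.Dict.counter_eq_foldl, List.foldl_map]
    apply PySem.List.foldl_congr_mem
    intro d c _
    simp only
    rw [pv_step_eq, pv_key_eq]
  rw [hfold, PySem.Dict.items_counter, pvGo_eq]
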